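-- pv_equiv track=rewrite | github.com/eunchae-jeon/algorithm | Programmers/kakaolasttest1.py | solution
-- ===== SOURCE A (Python) =====
-- import collections
--
-- def solution(board, moves):
--     answer = 0
--     n = len(board)
--     idxs = [-1 for _ in range(n)]
--     stack = collections.deque()
--     for i in range(n):
--         for j in range(n):
--             if board[i][j] != 0 and idxs[j] == -1:
--                 idxs[j] = i
--
--     for move in moves:
--         move -= 1
--         if idxs[move] == -1:
--             continue
--         else:
--             if len(stack) > 0 and stack[-1] == board[idxs[move]][move]:
--                 stack.pop()
--                 answer += 2
--             else:
--                 stack.append(board[idxs[move]][move])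
--             idxs[move] += 1
--             if idxs[move] == n:
--                 idxs[move] = -1
--
--     return answer
-- ===== SOURCE B (Python) =====
-- def solution(board, moves):
--     n = len(board)
--     cols = []
--     for j in range(n):
--         col = [board[i][j] for i in range(n)]
--         while col and col[0] == 0:
--             del col[0]
--         cols.append(col)
--     answer = 0
--     basket = []
--     for m in moves:
--         col = cols[m - 1]
--         if col:
--             x = col.pop(0)
--             if basket and basket[-1] == x:
--                 basket.pop()
--                 answer += 2
--             else:
--                 basket.append(x)
--     return answer
-- ===== Notes on version B (the rewrite author's own statement) =====
-- stated objective: simpler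
-- what changed: B materialises each column as an explicit stack (column values with leading zeros dropped, popped from the top) instead of A's per-column cursor indices into the board that are incremented and retired when they reach n.
-- outside the precondition, e.g. on solution([[1, 2, 7], [4, 9, 7]], [0, 0]): A returns 2, B returns 0
import Mathlib
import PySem

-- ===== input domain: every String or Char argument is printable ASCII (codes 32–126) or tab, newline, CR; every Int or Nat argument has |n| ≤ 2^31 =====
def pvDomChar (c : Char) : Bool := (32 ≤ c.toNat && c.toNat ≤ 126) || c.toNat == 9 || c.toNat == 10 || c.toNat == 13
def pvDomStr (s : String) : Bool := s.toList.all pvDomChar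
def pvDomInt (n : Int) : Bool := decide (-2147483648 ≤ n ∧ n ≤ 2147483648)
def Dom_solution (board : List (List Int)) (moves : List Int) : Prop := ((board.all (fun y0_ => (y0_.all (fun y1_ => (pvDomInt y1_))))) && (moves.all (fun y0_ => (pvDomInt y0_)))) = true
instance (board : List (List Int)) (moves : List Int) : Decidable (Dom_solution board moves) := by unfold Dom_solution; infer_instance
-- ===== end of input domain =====

-- B replaces A's per-column board cursors (idxs, incremented and retired at n) with
-- materialised per-column stacks popped directly; objective: simpler.

-- ===== PORT A =====

-- board[i][j] (defaults never hit inside Pre_solution, which guarantees in-range access)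
def pvGet (board : List (List Int)) (i j : Nat) : Int := (board.getD i []).getD j 0

-- Python's index resolution for a (possibly negative) in-range index into a length-n list;
-- inside Pre_solution every indexed list (idxs, cols, each board row) has length n, so this
-- is exact for both ports
def pvWrapIdx (n : Nat) (mv : Int) : Nat := (if mv < 0 then (n : Int) + mv else mv).toNat

-- body of the inner init loop: if board[i][j] != 0 and idxs[j] == -1: idxs[j] = i
def pvTouch (board : List (List Int)) (i : Nat) (idxs : List Int) (j : Nat) : List Int :=
  if pvGet board i j ≠ 0 ∧ idxs.getD j (-1) = -1 then idxs.set j (Int.ofNat i) else idxs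

-- the nested init loop: for i in range(n): for j in range(n): …
def pvInitIdxs (board : List (List Int)) (n : Nat) : List Int :=
  (List.range n).foldl (fun idxs i => (List.range n).foldl (pvTouch board i) idxs)
    (List.replicate n (-1))

-- one iteration of A's move loop; state = (answer, idxs, stack); stack top at HEAD (deque's right end)
def pvStepA (board : List (List Int)) (n : Nat) (st : Int × List Int × List Int) (move : Int) :
    Int × List Int × List Int :=
  let (answer, idxs, stack) := st
  let mv := pvWrapIdx n (move - 1)
  let idx := idxs.getD mv (-1)
  if idx = -1 then st
  else
    let v := pvGet board idx.toNat mv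
    let (answer, stack) :=
      match stack with
      | t :: rest => if t = v then (answer + 2, rest) else (answer, v :: t :: rest)
      | [] => (answer, [v])
    let idx' := idx + 1
    (answer, idxs.set mv (if idx' = (n : Int) then -1 else idx'), stack)

def solution (board : List (List Int)) (moves : List Int) : Int :=
  let n := board.length
  (moves.foldl (pvStepA board n) (0, pvInitIdxs board n, [])).1

-- ===== PORT B =====

-- while col and col[0] == 0: del col[0]
def pvDropZeros : List Int → List Int
  | [] => []
  | x :: xs => if x = 0 then pvDropZeros xs else x :: xs

-- cols[j] = column j of the board with its leading zeros removed (front = top doll)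
def pvInitCols (board : List (List Int)) (n : Nat) : List (List Int) :=
  (List.range n).map (fun j => pvDropZeros ((List.range n).map (fun i => pvGet board i j)))

-- one iteration of B's move loop; state = (answer, cols, basket); basket top at HEAD
def pvStepB (st : Int × List (List Int) × List Int) (m : Int) :
    Int × List (List Int) × List Int :=
  let (answer, cols, basket) := st
  let j := pvWrapIdx cols.length (m - 1)
  match cols.getD j [] with
  | [] => st
  | x :: rest =>
    match basket with
    | t :: bs =>
      if t = x then (answer + 2, cols.set j rest, bs) else (answer, cols.set j rest, x :: t :: bs)
    | [] => (answer, cols.set j rest, [x])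

def solution_alt (board : List (List Int)) (moves : List Int) : Int :=
  let n := board.length
  (moves.foldl pvStepB (0, pvInitCols board n, [])).1

-- ===== PRECONDITION & SPEC =====
-- Pre_ excludes rows shorter than n and moves outside [1-n, n] (A raises IndexError there), and
-- moves below 1 on boards with rows longer than n, where Python's negative indexing measures each
-- row from its own end, so the column A picks is an accident of the row length (A returns a value
-- there, hence the cite).
def Pre_solution (board : List (List Int)) (moves : List Int) : Prop :=
  (∀ row ∈ board, board.length ≤ row.length) ∧
  (∀ m ∈ moves, m ≤ (board.length : Int) ∧
    (1 ≤ m ∨ (1 - (board.length : Int) ≤ m ∧ ∀ row ∈ board, row.length = board.length)))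
instance (board : List (List Int)) (moves : List Int) : Decidable (Pre_solution board moves) := by
  unfold Pre_solution; infer_instance

def pvWitness_solution : List (List Int) × List Int :=
  ([[0, 0, 3], [0, 1, 2], [4, 1, 2]], [1, 2, 3, 3, 2, 2])

def Spec_solution (board : List (List Int)) (moves : List Int) (out : Int) : Prop := out = solution_alt board moves
instance (board : List (List Int)) (moves : List Int) (out : Int) : Decidable (Spec_solution board moves out) := by unfold Spec_solution; infer_instance

-- ===== CLAIM (what is proved, stated in full; the proofs are below) =====
def Claim_equal_solution : Prop := ∀ (board : List (List Int)) (moves : List Int), Dom_solution board moves → Pre_solution board moves → Spec_solution board moves (solution board moves)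

-- ===== LEMMAS AND PROOFS =====

theorem getD_set_ne {α : Type} (l : List α) (i j : Nat) (a d : α) (h : i ≠ j) :
    (l.set i a).getD j d = l.getD j d := by
  simp [List.getD, List.getElem?_set_ne h]

theorem getD_set_self {α : Type} (l : List α) (i : Nat) (a d : α) (h : i < l.length) :
    (l.set i a).getD i d = a := by
  simp [List.getD, h]

-- column j of the board, as the list of its n entries
def pvCol (board : List (List Int)) (n j : Nat) : List Int :=
  (List.range n).map (fun i => pvGet board i j)

theorem pvCol_length (board : List (List Int)) (n j : Nat) : (pvCol board n j).length = n := by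
  simp [pvCol]

theorem pvCol_getD (board : List (List Int)) (n j k : Nat) (hk : k < n) :
    (pvCol board n j).getD k 0 = pvGet board k j := by
  simp [pvCol, List.getD, hk]

-- per-column relation between A's cursor and B's stack
def pvPJ (board : List (List Int)) (n j : Nat) (idx : Int) (c : List Int) : Prop :=
  (idx = -1 ∧ c = []) ∨ ∃ k : Nat, idx = (k : Int) ∧ k < n ∧ c = (pvCol board n j).drop k

-- full state relation
def pvR (board : List (List Int)) (n : Nat)
    (sA : Int × List Int × List Int) (sB : Int × List (List Int) × List Int) : Prop :=
  sA.1 = sB.1 ∧ sA.2.2 = sB.2.2 ∧ sA.2.1.length = n ∧ sB.2.1.length = n ∧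
  ∀ j < n, pvPJ board n j (sA.2.1.getD j (-1)) (sB.2.1.getD j [])

theorem dropZeros_of_first :
    ∀ (c : List Int) (k : Nat), k < c.length → c.getD k 0 ≠ 0 →
      (∀ r < k, c.getD r 0 = 0) → pvDropZeros c = c.drop k := by
  intro c
  induction c with
  | nil => intro k hk; simp at hk
  | cons x xs ih =>
    intro k hk hnz hz
    cases k with
    | zero =>
      rw [List.getD_cons_zero] at hnz
      simp [pvDropZeros, hnz]
    | succ k' =>
      have hx : x = 0 := by have := hz 0 (Nat.succ_pos _); rwa [List.getD_cons_zero] at this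
      have hrec : pvDropZeros xs = xs.drop k' := by
        apply ih k' (by simpa using hk) (by rwa [List.getD_cons_succ] at hnz)
        intro r hr
        have := hz (r + 1) (by omega)
        rwa [List.getD_cons_succ] at this
      simp [pvDropZeros, hx, hrec]

theorem dropZeros_all_zero :
    ∀ (c : List Int), (∀ r < c.length, c.getD r 0 = 0) → pvDropZeros c = [] := by
  intro c
  induction c with
  | nil => intro; rfl
  | cons x xs ih =>
    intro h
    have hx : x = 0 := by have := h 0 (Nat.succ_pos _); rwa [List.getD_cons_zero] at this
    have hrec : pvDropZeros xs = [] := by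
      apply ih; intro r hr
      have := h (r + 1) (by simpa using hr)
      rwa [List.getD_cons_succ] at this
    simp [pvDropZeros, hx, hrec]

theorem touch_length (board : List (List Int)) (i j : Nat) (idxs : List Int) :
    (pvTouch board i idxs j).length = idxs.length := by
  unfold pvTouch; split <;> simp

theorem fold_touch_length (board : List (List Int)) (i : Nat) :
    ∀ (l : List Nat) (idxs : List Int),
      (l.foldl (pvTouch board i) idxs).length = idxs.length := by
  intro l
  induction l with
  | nil => intro; rfl
  | cons a l ih => intro idxs; rw [List.foldl_cons, ih, touch_length]

theorem touch_getD_ne (board : List (List Int)) (i j j' : Nat) (h : j' ≠ j) (idxs : List Int) (d : Int) :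
    (pvTouch board i idxs j).getD j' d = idxs.getD j' d := by
  unfold pvTouch; split
  · exact getD_set_ne _ _ _ _ _ (Ne.symm h)
  · rfl

theorem fold_touch_notmem (board : List (List Int)) (i : Nat) :
    ∀ (l : List Nat) (j : Nat), j ∉ l → ∀ (idxs : List Int) (d : Int),
      (l.foldl (pvTouch board i) idxs).getD j d = idxs.getD j d := by
  intro l
  induction l with
  | nil => intros; rfl
  | cons a l ih =>
    intro j hj idxs d
    rw [List.foldl_cons, ih j (by simp at hj; exact hj.2), touch_getD_ne]
    simp at hj; exact hj.1

theorem fold_touch_mem (board : List (List Int)) (i : Nat) :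
    ∀ (l : List Nat), l.Nodup → ∀ j ∈ l, ∀ (idxs : List Int), j < idxs.length →
      (l.foldl (pvTouch board i) idxs).getD j (-1) =
        (if pvGet board i j ≠ 0 ∧ idxs.getD j (-1) = -1 then (Int.ofNat i) else idxs.getD j (-1)) := by
  intro l
  induction l with
  | nil => intro _ j hj; simp at hj
  | cons a l ih =>
    intro hnd j hj idxs hlen
    rw [List.nodup_cons] at hnd
    rcases List.mem_cons.mp hj with rfl | hj'
    · rw [List.foldl_cons, fold_touch_notmem board i l j hnd.1]
      unfold pvTouch
      split
      · exact getD_set_self _ _ _ _ hlen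
      · rfl
    · rw [List.foldl_cons]
      rw [ih hnd.2 j hj' _ (by rw [touch_length]; exact hlen)]
      have hne : j ≠ a := fun h => hnd.1 (h ▸ hj')
      rw [touch_getD_ne board i a j hne]

-- the state of A's init loop after processing the first i rows
def pvInitPrefix (board : List (List Int)) (n i : Nat) : List Int :=
  (List.range i).foldl (fun idxs i => (List.range n).foldl (pvTouch board i) idxs)
    (List.replicate n (-1))

theorem initPrefix_succ (board : List (List Int)) (n i : Nat) :
    pvInitPrefix board n (i + 1) = (List.range n).foldl (pvTouch board i) (pvInitPrefix board n i) := by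
  simp [pvInitPrefix, List.range_succ]

theorem initPrefix_length (board : List (List Int)) (n : Nat) :
    ∀ i, (pvInitPrefix board n i).length = n := by
  intro i
  induction i with
  | zero => simp [pvInitPrefix]
  | succ i ih => rw [initPrefix_succ, fold_touch_length, ih]

theorem initPrefix_spec (board : List (List Int)) (n : Nat) :
    ∀ (i : Nat), ∀ j < n,
      ((pvInitPrefix board n i).getD j (-1) = -1 ∧ ∀ r < i, pvGet board r j = 0) ∨
      (∃ k : Nat, (pvInitPrefix board n i).getD j (-1) = (k : Int) ∧ k < i ∧
        pvGet board k j ≠ 0 ∧ ∀ r < k, pvGet board r j = 0) := by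
  intro i
  induction i with
  | zero =>
    intro j hj
    left
    refine ⟨?_, fun r hr => absurd hr (Nat.not_lt_zero r)⟩
    simp [pvInitPrefix, List.getD, hj]
  | succ i ih =>
    intro j hj
    rw [initPrefix_succ,
        fold_touch_mem board i (List.range n) List.nodup_range j (List.mem_range.mpr hj)
          _ (by rw [initPrefix_length]; exact hj)]
    rcases ih j hj with ⟨hneg, hz⟩ | ⟨k, hk, hkn, hknz, hkz⟩
    · by_cases hb : pvGet board i j ≠ 0
      · right
        refine ⟨i, ?_, by omega, hb, fun r hr => hz r hr⟩
        rw [if_pos ⟨hb, hneg⟩]; rfl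
      · left
        rw [not_not] at hb
        refine ⟨by rw [if_neg (fun h => h.1 hb)]; exact hneg, ?_⟩
        intro r hr
        rcases Nat.lt_succ_iff_lt_or_eq.mp hr with h | rfl
        · exact hz r h
        · exact hb
    · right
      refine ⟨k, ?_, by omega, hknz, hkz⟩
      have hcond : ¬ (pvGet board i j ≠ 0 ∧ (pvInitPrefix board n i).getD j (-1) = -1) := by
        intro ⟨_, hcontra⟩
        rw [hk] at hcontra
        omega
      rw [if_neg hcond, hk]

theorem initCols_length (board : List (List Int)) (n : Nat) : (pvInitCols board n).length = n := by
  simp [pvInitCols]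

theorem initCols_getD (board : List (List Int)) (n j : Nat) (hj : j < n) :
    (pvInitCols board n).getD j [] = pvDropZeros (pvCol board n j) := by
  simp [pvInitCols, pvCol, List.getD, hj]

-- the initial states are related
theorem init_rel (board : List (List Int)) (n : Nat) :
    pvR board n (0, pvInitIdxs board n, []) (0, pvInitCols board n, []) := by
  have hinit : pvInitIdxs board n = pvInitPrefix board n n := rfl
  refine ⟨rfl, rfl, by rw [hinit]; exact initPrefix_length board n n, initCols_length board n, ?_⟩
  intro j hj
  rw [initCols_getD board n j hj, hinit]
  rcases initPrefix_spec board n n j hj with ⟨hneg, hz⟩ | ⟨k, hk, hkn, hknz, hkz⟩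
  · left
    refine ⟨hneg, ?_⟩
    apply dropZeros_all_zero
    intro r hr
    rw [pvCol_length] at hr
    rw [pvCol_getD board n j r hr]
    exact hz r hr
  · right
    refine ⟨k, hk, hkn, ?_⟩
    refine (dropZeros_of_first (pvCol board n j) k ?_ ?_ ?_).symm ▸ rfl
    · rw [pvCol_length]; exact hkn
    · rw [pvCol_getD board n j k hkn]; exact hknz
    · intro r hr
      rw [pvCol_getD board n j r (by omega)]
      exact hkz r hr

-- a nonempty drop decomposes as head :: next drop
theorem drop_cons_of_lt (c : List Int) (k : Nat) (hk : k < c.length) :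
    c.drop k = c.getD k 0 :: c.drop (k + 1) := by
  rw [List.getD, List.getElem?_eq_getElem hk]
  exact List.drop_eq_getElem_cons hk

-- one step preserves the relation
theorem step_rel (board : List (List Int)) (n : Nat)
    (sA : Int × List Int × List Int) (sB : Int × List (List Int) × List Int)
    (m : Int) (hm : m ≤ (n : Int) ∧ (1 ≤ m ∨ 1 - (n : Int) ≤ m)) (hR : pvR board n sA sB) :
    pvR board n (pvStepA board n sA m) (pvStepB sB m) := by
  obtain ⟨a, idxs, stack⟩ := sA
  obtain ⟨a', cols, basket⟩ := sB
  obtain ⟨ha, hst, hlA, hlB, hP⟩ := hR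
  simp only at ha hst hlA hlB hP
  subst ha hst
  unfold pvStepA pvStepB
  simp only [hlB]
  set jj := pvWrapIdx n (m - 1) with hjj
  obtain ⟨hm1, hm2⟩ := hm
  have hmv : jj < n := by rw [hjj]; unfold pvWrapIdx; split <;> omega
  have hPm := hP jj hmv
  rcases hPm with ⟨hneg, hnil⟩ | ⟨k, hk, hkn, hc⟩
  · rw [hneg, hnil]
    exact ⟨rfl, rfl, hlA, hlB, hP⟩
  · have hklen : k < (pvCol board n (jj)).length := by rw [pvCol_length]; exact hkn
    have hcc : cols.getD (jj) [] =
        pvGet board k (jj) :: (pvCol board n (jj)).drop (k + 1) := by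
      rw [hc, drop_cons_of_lt _ k hklen, pvCol_getD board n _ k hkn]
    rw [hcc, hk]
    have hkne : ¬ ((k : Int) = -1) := by omega
    rw [if_neg hkne]
    simp only [Int.toNat_natCast]
    have hPnew : ∀ j < n,
        pvPJ board n j ((idxs.set (jj)
            (if (k : Int) + 1 = (n : Int) then -1 else (k : Int) + 1)).getD j (-1))
          ((cols.set (jj) ((pvCol board n (jj)).drop (k + 1))).getD j []) := by
      intro j hj
      by_cases hjm : j = jj
      · subst hjm
        rw [getD_set_self _ _ _ _ (by omega), getD_set_self _ _ _ _ (by omega)]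
        by_cases hkn1 : k + 1 = n
        · left
          refine ⟨by simp [show (k : Int) + 1 = (n : Int) by omega], ?_⟩
          rw [← pvCol_length board n (jj)] at hkn1
          rw [hkn1, List.drop_length]
        · right
          refine ⟨k + 1, ?_, by omega, rfl⟩
          rw [if_neg (by omega)]
          omega
      · rw [getD_set_ne _ _ _ _ _ (fun h => hjm h.symm), getD_set_ne _ _ _ _ _ (fun h => hjm h.symm)]
        exact hP j hj
    cases stack with
    | nil =>
      exact ⟨rfl, rfl, by simpa using hlA, by simpa using hlB, hPnew⟩
    | cons t bs =>
      by_cases htv : t = pvGet board k (jj)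
      · simp only [htv]
        exact ⟨rfl, rfl, by simpa using hlA, by simpa using hlB, hPnew⟩
      · simp only [if_neg htv]
        exact ⟨rfl, rfl, by simpa using hlA, by simpa using hlB, hPnew⟩

theorem fold_rel (board : List (List Int)) (n : Nat) :
    ∀ (moves : List Int) (sA : Int × List Int × List Int) (sB : Int × List (List Int) × List Int),
      (∀ m ∈ moves, m ≤ (n : Int) ∧ (1 ≤ m ∨ 1 - (n : Int) ≤ m)) → pvR board n sA sB →
      pvR board n (moves.foldl (pvStepA board n) sA) (moves.foldl pvStepB sB) := by
  intro moves
  induction moves with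
  | nil => intro sA sB _ h; exact h
  | cons m ms ih =>
    intro sA sB hm hR
    rw [List.foldl_cons, List.foldl_cons]
    exact ih _ _ (fun x hx => hm x (List.mem_cons_of_mem m hx))
      (step_rel board n sA sB m (hm m List.mem_cons_self) hR)

-- ===== VERDICT (by name: the statement is the Claim_ definition above) =====
theorem solution_spec : Claim_equal_solution := by
  intro board moves _ hpre
  unfold Spec_solution solution solution_alt
  exact (fold_rel board board.length moves _ _
    (fun m hm => ⟨(hpre.2 m hm).1, (hpre.2 m hm).2.elim Or.inl (fun h => Or.inr h.1)⟩)
    (init_rel board board.length)).1
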